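-- pv_equiv track=rewrite | github.com/ttzytt/PyAutoGrade | tests/Block 4/tested_code/21/Unit 1/Cards/card_functions.py | uno_who_played_what_1
-- ===== SOURCE A (Python) =====
-- def uno_who_played_what_1(cards_played, num_players=4,starting_player=1):
--
--     Featured_value = [0]*len(cards_played)
--
--     Signal = 1
--     if len(cards_played)!= 0:
--         if cards_played[0] == 'reverse':
--              Signal = -1
--
--     results = []
--
--     for i in range(num_players):
--         results.append([])
--     for i in range(1,len(cards_played)):
--
--         if cards_played[i-1][0] == 'skip':
--             Featured_value[i] = Featured_value[i-1] + 2*Signal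
--
--         else:
--             Featured_value[i] = Featured_value[i-1] + Signal
--
--         if cards_played[i][0] == 'reverse':
--             Signal = Signal * (-1)
--
--     for i in range(len(cards_played)):
--         for j in range(num_players):
--             if Featured_value[i] % num_players == j:
--                 results[(j+starting_player-1)%num_players].append(cards_played[i])
--     return results
-- ===== SOURCE B (Python) =====
-- # Direct O(len + num_players) re-implementation.
-- # Note on A's semantics: A's 'skip'/'reverse' branches inside its loop compare a single
-- # character (card[0]) with a multi-character string, so they never fire; only the whole-string
-- # test cards_played[0] == 'reverse' before the loop matters.  Hence A's Featured_value[i] is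
-- # exactly i * sig, and the destination bucket of card i is (i*sig + starting_player - 1) % num_players.
-- def uno_who_played_what_1(cards_played, num_players=4, starting_player=1):
--     sig = -1 if cards_played and cards_played[0] == 'reverse' else 1
--     results = [[] for _ in range(num_players)]
--     for i, card in enumerate(cards_played):
--         results[(i * sig + starting_player - 1) % num_players].append(card)
--     return results
-- ===== Notes on version B (the rewrite author's own statement) =====
-- stated objective: faster
-- what changed: B computes each card's bucket directly as (i*sig + starting_player - 1) % num_players in one pass over the cards, instead of A's Featured_value array plus a nested scan over all num_players residues for every card.
-- outside the precondition, e.g. on uno_who_played_what_1(['a'], 0, 1): A returns [], B raises ZeroDivisionError; on uno_who_played_what_1(['a', 'b'], -2, 1): A returns [], B raises IndexError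
import Mathlib
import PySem

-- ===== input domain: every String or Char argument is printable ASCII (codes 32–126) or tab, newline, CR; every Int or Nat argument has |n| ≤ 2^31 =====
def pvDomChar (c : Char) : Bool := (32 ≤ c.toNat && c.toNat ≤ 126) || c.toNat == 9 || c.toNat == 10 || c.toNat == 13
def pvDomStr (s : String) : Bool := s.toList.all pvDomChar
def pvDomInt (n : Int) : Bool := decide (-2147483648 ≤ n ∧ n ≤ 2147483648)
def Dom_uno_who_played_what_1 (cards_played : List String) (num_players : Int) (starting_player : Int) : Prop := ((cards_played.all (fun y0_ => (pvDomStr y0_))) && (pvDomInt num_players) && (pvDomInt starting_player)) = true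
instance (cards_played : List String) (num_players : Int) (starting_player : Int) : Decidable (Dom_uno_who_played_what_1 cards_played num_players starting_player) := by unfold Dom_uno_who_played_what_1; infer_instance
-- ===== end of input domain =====

-- B assigns each card its player bucket by a direct formula in one pass, replacing A's
-- Featured_value array and per-card scan over all num_players residues (objective: faster).

-- ===== PORT A =====
-- Python's s[0] as a 1-character string; "" when s = "" (there Python raises IndexError;
-- such inputs are excluded by Pre_).
def pvChar0 (s : String) : String :=
  match PySem.Str.pyGet? s 0 with
  | some c => String.ofList [c]
  | none => ""

def uno_who_played_what_1 (cards_played : List String) (num_players : Int) (starting_player : Int) : List (List String) :=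
  let featured0 : List Int := List.replicate cards_played.length 0
  let signal0 : Int :=
    if cards_played.length ≠ 0 then
      if PySem.List.pyGetD cards_played 0 "" = "reverse" then -1 else 1
    else 1
  let results0 : List (List String) :=
    (PySem.List.pyRange 0 num_players 1).foldl (fun acc _ => acc ++ [([] : List String)]) []
  let st :=
    (PySem.List.pyRange 1 (cards_played.length : Int) 1).foldl (fun (st : List Int × Int) i =>
      let fv := if pvChar0 (PySem.List.pyGetD cards_played (i - 1) "") = "skip" then
          PySem.List.pySetD st.1 i (PySem.List.pyGetD st.1 (i - 1) 0 + 2 * st.2)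
        else
          PySem.List.pySetD st.1 i (PySem.List.pyGetD st.1 (i - 1) 0 + st.2)
      let sg := if pvChar0 (PySem.List.pyGetD cards_played i "") = "reverse" then st.2 * (-1) else st.2
      (fv, sg)) (featured0, signal0)
  (PySem.List.pyRange 0 (cards_played.length : Int) 1).foldl (fun res i =>
    (PySem.List.pyRange 0 num_players 1).foldl (fun res j =>
      if PySem.Int.mod (PySem.List.pyGetD st.1 i 0) num_players = j then
        PySem.List.pySetD res (PySem.Int.mod (j + starting_player - 1) num_players)
          (PySem.List.pyGetD res (PySem.Int.mod (j + starting_player - 1) num_players) []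
            ++ [PySem.List.pyGetD cards_played i ""])
      else res) res) results0

-- ===== PORT B =====
def uno_who_played_what_1_alt (cards_played : List String) (num_players : Int) (starting_player : Int) : List (List String) :=
  -- sig = -1 if cards_played and cards_played[0] == 'reverse' else 1
  let sig : Int := if cards_played ≠ [] ∧ PySem.List.pyGetD cards_played 0 "" = "reverse" then -1 else 1
  let results : List (List String) := (PySem.List.pyRange 0 num_players 1).map (fun _ => [])
  (PySem.List.enumerate cards_played 0).foldl (fun res p =>
    let k := PySem.Int.mod (p.1 * sig + starting_player - 1) num_players
    PySem.List.pySetD res k (PySem.List.pyGetD res k [] ++ [p.2])) results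

-- ===== PRECONDITION & SPEC =====
-- Pre_ excludes exactly (i) num_players ≤ 0 with a nonempty card list, where A returns [] but
-- B's Python itself raises (ZeroDivisionError / IndexError from the % num_players index), and
-- (ii) lists of length ≥ 2 containing an empty string, where A raises IndexError (cards_played[i][0]).
def Pre_uno_who_played_what_1 (cards_played : List String) (num_players : Int) (starting_player : Int) : Prop :=
  (1 ≤ num_players ∨ cards_played = []) ∧
  (cards_played.length ≤ 1 ∨ ∀ c ∈ cards_played, c ≠ "")
instance (cards_played : List String) (num_players : Int) (starting_player : Int) : Decidable (Pre_uno_who_played_what_1 cards_played num_players starting_player) := by unfold Pre_uno_who_played_what_1; infer_instance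

def pvWitness_uno_who_played_what_1 : List String × Int × Int := (["red 5", "reverse", "skip"], 4, 2)

def Spec_uno_who_played_what_1 (cards_played : List String) (num_players : Int) (starting_player : Int) (out : List (List String)) : Prop := out = uno_who_played_what_1_alt cards_played num_players starting_player
instance (cards_played : List String) (num_players : Int) (starting_player : Int) (out : List (List String)) : Decidable (Spec_uno_who_played_what_1 cards_played num_players starting_player out) := by unfold Spec_uno_who_played_what_1; infer_instance

-- ===== CLAIM (what is proved, stated in full; the proofs are below) =====
def Claim_equal_uno_who_played_what_1 : Prop := ∀ (cards_played : List String) (num_players : Int) (starting_player : Int), Dom_uno_who_played_what_1 cards_played num_players starting_player → Pre_uno_who_played_what_1 cards_played num_players starting_player → Spec_uno_who_played_what_1 cards_played num_players starting_player (uno_who_played_what_1 cards_played num_players starting_player)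

-- ===== LEMMAS AND PROOFS =====

-- A compares cards_played[i][0] (one character) with 'skip'/'reverse': never equal.
theorem pvChar0_ne_skip (s : String) : pvChar0 s ≠ "skip" := by
  unfold pvChar0
  cases h : PySem.Str.pyGet? s 0 with
  | none => simp
  | some c =>
      intro he
      have := congrArg String.toList he
      simp at this

theorem pvChar0_ne_reverse (s : String) : pvChar0 s ≠ "reverse" := by
  unfold pvChar0
  cases h : PySem.Str.pyGet? s 0 with
  | none => simp
  | some c =>
      intro he
      have := congrArg String.toList he
      simp at this

-- A's initial Signal equals B's sig
theorem pv_sig (cards : List String) :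
    (if cards.length ≠ 0 then
      (if PySem.List.pyGetD cards 0 "" = "reverse" then (-1 : Int) else 1) else 1)
    = (if cards ≠ [] ∧ PySem.List.pyGetD cards 0 "" = "reverse" then (-1 : Int) else 1) := by
  cases cards <;> simp

theorem pv_set_map_range {α : Type} (N m : Nat) (f : Nat → α) (v : α) (hm : m < N) :
    ((List.range N).map f).set m v = (List.range N).map (fun k => if k = m then v else f k) := by
  apply List.ext_getElem
  · simp
  · intro i h1 h2
    simp only [List.getElem_set, List.getElem_map, List.getElem_range]
    simp only [List.length_set, List.length_map, List.length_range] at h1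
    split_ifs with h3 h4 h5 <;> first | rfl | omega

-- enumerate(cards) as an index comprehension
theorem pv_enum_eq_map (xs : List String) :
    ∀ (s : Int), PySem.List.enumerate xs s
      = (List.range xs.length).map (fun k : Nat => (s + (k : Int), xs.getD k "")) := by
  induction xs with
  | nil => intro s; simp [PySem.List.enumerate_nil]
  | cons x xs ih =>
      intro s
      rw [PySem.List.enumerate_cons, ih (s + 1)]
      simp only [List.length_cons, List.range_succ_eq_map, List.map_cons, List.map_map]
      refine congrArg₂ _ (by simp) ?_
      apply List.map_congr_left
      intro k hk
      simp only [Function.comp_apply, List.getD_cons_succ]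
      refine congrArg₂ _ ?_ rfl
      push_cast
      ring

-- A's Featured_value loop: since the dead branches never fire, FV[k] = k * sig
theorem pv_fv (cards : List String) (sig : Int) :
    ∀ (m : Nat), m ≤ cards.length →
    (PySem.List.pyRange 1 (m : Int) 1).foldl (fun (st : List Int × Int) i =>
      let fv := if pvChar0 (PySem.List.pyGetD cards (i - 1) "") = "skip" then
          PySem.List.pySetD st.1 i (PySem.List.pyGetD st.1 (i - 1) 0 + 2 * st.2)
        else
          PySem.List.pySetD st.1 i (PySem.List.pyGetD st.1 (i - 1) 0 + st.2)
      let sg := if pvChar0 (PySem.List.pyGetD cards i "") = "reverse" then st.2 * (-1) else st.2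
      (fv, sg)) (List.replicate cards.length 0, sig)
    = ((List.range cards.length).map (fun k => if k < m then (k : Int) * sig else 0), sig) := by
  intro m
  induction m with
  | zero =>
      intro _
      rw [PySem.List.pyRange_one_eq_nil (by norm_num)]
      simp
  | succ m ih =>
      intro hm
      by_cases hm0 : m = 0
      · subst hm0
        rw [PySem.List.pyRange_one_eq_nil (by norm_num)]
        simp only [List.foldl_nil, Prod.mk.injEq, and_true]
        apply List.ext_getElem
        · simp
        · intro i h1 h2
          simp only [List.length_replicate] at h1
          simp only [List.getElem_replicate, List.getElem_map, List.getElem_range]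
          split_ifs with h
          · interval_cases i; simp
          · rfl
      · have h1m : (1 : Int) ≤ (m : Int) := by omega
        have hcast : ((m + 1 : Nat) : Int) = (m : Int) + 1 := by push_cast; ring
        rw [hcast, PySem.List.pyRange_one_succ_right h1m, List.foldl_append,
          ih (by omega)]
        simp only [List.foldl_cons, List.foldl_nil]
        rw [if_neg (pvChar0_ne_skip _), if_neg (pvChar0_ne_reverse _)]
        simp only [Prod.mk.injEq]
        constructor
        · have hm1 : ((m : Int) - 1) = ((m - 1 : Nat) : Int) := by omega
          rw [hm1, PySem.List.pyGetD_natCast, PySem.List.pySetD_natCast,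
            PySem.List.getD_map_range _ _ _ _ (by omega),
            pv_set_map_range _ _ _ _ (by omega)]
          apply List.map_congr_left
          intro k hk
          rw [if_pos (by omega : m - 1 < m)]
          by_cases hkm : k = m
          · rw [if_pos hkm, if_pos (by omega)]
            have : ((m - 1 : Nat) : Int) = (k : Int) - 1 := by omega
            rw [this]; ring
          · rw [if_neg hkm]
            by_cases hlt : k < m
            · rw [if_pos hlt, if_pos (by omega)]
            · rw [if_neg hlt, if_neg (by omega)]
        · trivial

-- the fold with an 'if hit' test visits no hit: identity
theorem pv_foldl_hit_free {β : Type} (l : List Int) (t : Int) (f : β → Int → β) (h : t ∉ l) (b : β) :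
    l.foldl (fun r j => if t = j then f r j else r) b = b := by
  induction l generalizing b with
  | nil => rfl
  | cons a l ih =>
      simp only [List.foldl_cons]
      have hta : t ≠ a := by intro he; exact h (he ▸ List.mem_cons_self)
      rw [if_neg hta]
      exact ih (fun hm => h (List.mem_cons_of_mem _ hm)) b

-- the fold with an 'if hit' test on a nodup list containing the hit applies f exactly once
theorem pv_foldl_single_hit {β : Type} (l : List Int) (t : Int) (f : β → Int → β)
    (hnd : l.Nodup) (ht : t ∈ l) (b : β) :
    l.foldl (fun r j => if t = j then f r j else r) b = f b t := by
  induction l generalizing b with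
  | nil => cases ht
  | cons a l ih =>
      simp only [List.foldl_cons]
      rcases List.mem_cons.mp ht with he | hm
      · subst he
        rw [if_pos rfl]
        exact pv_foldl_hit_free l t f (List.nodup_cons.mp hnd).1 _
      · have hta : t ≠ a := by
          intro he; exact (List.nodup_cons.mp hnd).1 (he ▸ hm)
        rw [if_neg hta]
        exact ih (List.nodup_cons.mp hnd).2 hm b

theorem pv_modmod (x c n : Int) (hn : 0 < n) :
    PySem.Int.mod (PySem.Int.mod x n + c) n = PySem.Int.mod (x + c) n := by
  rw [PySem.Int.mod_eq_emod_of_pos hn, PySem.Int.mod_eq_emod_of_pos hn,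
    PySem.Int.mod_eq_emod_of_pos hn]
  conv_rhs => rw [Int.add_emod]
  rw [Int.add_emod (x % n) c, Int.emod_emod_of_dvd x dvd_rfl]

-- A's inner scan over all residues j hits exactly j = x % n
theorem pv_inner (n sp : Int) (hn : 0 < n) (x : Int) (c : String) (res : List (List String)) :
    (PySem.List.pyRange 0 n 1).foldl (fun res j =>
      if PySem.Int.mod x n = j then
        PySem.List.pySetD res (PySem.Int.mod (j + sp - 1) n)
          (PySem.List.pyGetD res (PySem.Int.mod (j + sp - 1) n) [] ++ [c])
      else res) res
    = PySem.List.pySetD res (PySem.Int.mod (x + sp - 1) n)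
        (PySem.List.pyGetD res (PySem.Int.mod (x + sp - 1) n) [] ++ [c]) := by
  rw [pv_foldl_single_hit _ (PySem.Int.mod x n) _ (PySem.List.nodup_pyRange_one 0 n)
    (PySem.List.mem_pyRange_one.mpr ⟨PySem.Int.mod_nonneg x hn, PySem.Int.mod_lt x hn⟩)]
  rw [add_sub_assoc, pv_modmod x (sp - 1) n hn, ← add_sub_assoc]

-- ===== VERDICT (by name: the statement is the Claim_ definition above) =====
theorem uno_who_played_what_1_spec : Claim_equal_uno_who_played_what_1 := by
  intro cards n sp _ hpre
  unfold Spec_uno_who_played_what_1 uno_who_played_what_1 uno_who_played_what_1_alt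
  rcases hpre.1 with hn | hnil
  · -- num_players ≥ 1
    have hn0 : (0 : Int) < n := by omega
    rw [pv_sig]
    dsimp only
    rw [pv_fv cards _ cards.length le_rfl]
    dsimp only
    rw [PySem.List.foldl_append_singleton_eq_map (fun _ => ([] : List String)), List.nil_append]
    rw [PySem.List.foldl_congr_mem _ _
      (fun res i => PySem.List.pySetD res (PySem.Int.mod (i * (if cards ≠ [] ∧ PySem.List.pyGetD cards 0 "" = "reverse" then (-1 : Int) else 1) + sp - 1) n)
        (PySem.List.pyGetD res (PySem.Int.mod (i * (if cards ≠ [] ∧ PySem.List.pyGetD cards 0 "" = "reverse" then (-1 : Int) else 1) + sp - 1) n) []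
          ++ [PySem.List.pyGetD cards i ""])) _
      (by
        intro res i hi
        obtain ⟨hi0, hiN⟩ := PySem.List.mem_pyRange_one.mp hi
        have hfv : PySem.List.pyGetD ((List.range cards.length).map
            (fun k => if k < cards.length then (k : Int) * (if cards ≠ [] ∧ PySem.List.pyGetD cards 0 "" = "reverse" then (-1 : Int) else 1) else 0)) i 0
            = i * (if cards ≠ [] ∧ PySem.List.pyGetD cards 0 "" = "reverse" then (-1 : Int) else 1) := by
          have h1 : i = ((i.toNat : Nat) : Int) := by omega
          rw [h1, PySem.List.pyGetD_natCast,
            PySem.List.getD_map_range _ _ _ _ (by omega), if_pos (by omega)]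
        simp only [hfv]
        exact pv_inner n sp hn0 _ _ res)]
    rw [pv_enum_eq_map cards 0, List.foldl_map,
      PySem.List.pyRange_zero_natCast, List.foldl_map]
    apply PySem.List.foldl_congr_mem
    intro res k hk
    simp only [zero_add, PySem.List.pyGetD_natCast]
  · -- cards_played = []
    subst hnil
    simp only [List.length_nil, Nat.cast_zero]
    rw [PySem.List.pyRange_one_eq_nil (by norm_num : (0:Int) ≤ 1),
      PySem.List.pyRange_one_eq_nil (le_refl (0:Int))]
    simp only [List.foldl_nil, PySem.List.enumerate_nil]
    rw [PySem.List.foldl_append_singleton_eq_map (fun _ => ([] : List String))]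
    simp
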